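-- pv_equiv track=rewrite | github.com/justinlevi/praxis-vision-report | src/praxis_vision_report/tasks/vision_analyze_batch/service.py | distribute_transcript_evenly
-- ===== SOURCE A (Python) =====
-- import math
--
-- def distribute_transcript_evenly(transcript: str, n: int) -> list[str]:
--     """Split a raw transcript into n roughly equal chunks.
--
--     Edge cases: n <= 0 returns [], n == 1 returns [transcript].
--     """
--     if n <= 0:
--         return []
--     if n == 1:
--         return [transcript]
--
--     words = transcript.split()
--     total = len(words)
--     if total == 0:
--         return [""] * n
--
--     chunk_size = math.ceil(total / n)
--     chunks: list[str] = []
--     for i in range(n):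
--         start = i * chunk_size
--         end = min(start + chunk_size, total)
--         chunk = " ".join(words[start:end])
--         chunks.append(chunk)
--
--     # If we ended early (fewer chunks than n), pad with empty strings
--     while len(chunks) < n:
--         chunks.append("")
--
--     return chunks
-- ===== SOURCE B (Python) =====
-- def distribute_transcript_evenly(transcript: str, n: int) -> list[str]:
--     """Split a raw transcript into n roughly equal chunks.
--
--     Edge cases: n <= 0 returns [], n == 1 returns [transcript].
--
--     Single streaming pass: build each chunk string word by word with a
--     running counter, flushing whenever it reaches chunk_size; no index
--     arithmetic and no list slicing.
--     """
--     if n <= 0: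
--         return []
--     if n == 1:
--         return [transcript]
--
--     words = transcript.split()
--     total = len(words)
--     if total == 0:
--         return [""] * n
--
--     chunk_size = (total + n - 1) // n  # ceil(total / n)
--     chunks: list[str] = []
--     cur = ""
--     count = 0
--     for w in words:
--         cur = w if count == 0 else cur + " " + w
--         count += 1
--         if count == chunk_size:
--             chunks.append(cur)
--             cur = ""
--             count = 0
--     if count != 0:
--         chunks.append(cur)
--     chunks.extend([""] * (n - len(chunks)))
--     return chunks
-- ===== Notes on version B (the rewrite author's own statement) =====
-- stated objective: alternative
-- what changed: Replaces A's chunk-indexed construction (n iterations computing start/end offsets, slicing words[start:end] and joining each slice, then a while-pad loop) with a single streaming pass over the words that builds each chunk string incrementally with a running word counter and flushes it when the counter reaches chunk_size; padding is appended once arithmetically.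
import Mathlib
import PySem

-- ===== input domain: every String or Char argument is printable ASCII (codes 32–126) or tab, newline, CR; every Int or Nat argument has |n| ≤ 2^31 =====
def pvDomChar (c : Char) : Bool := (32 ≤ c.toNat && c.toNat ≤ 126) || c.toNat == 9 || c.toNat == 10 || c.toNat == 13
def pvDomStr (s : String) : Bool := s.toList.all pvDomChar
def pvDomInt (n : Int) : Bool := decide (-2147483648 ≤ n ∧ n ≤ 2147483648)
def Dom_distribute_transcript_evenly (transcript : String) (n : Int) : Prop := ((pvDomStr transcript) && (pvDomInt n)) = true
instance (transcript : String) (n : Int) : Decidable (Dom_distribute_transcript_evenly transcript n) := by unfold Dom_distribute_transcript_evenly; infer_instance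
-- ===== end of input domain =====

-- B replaces A's chunk-indexed slicing loop (n iterations of start/end math plus a while-pad
-- loop) by a single streaming fold over the words that accumulates each chunk string with a
-- running counter and flushes at chunk_size (objective: alternative, same asymptotic cost).


-- ===== PORT A =====
-- the trailing 'while len(chunks) < n: chunks.append("")' loop of A
-- (fuel loop: n.toNat iterations always suffice, since each appends one element)
def pvPadGo (n : Int) (fuel : Nat) (chunks : List String) : List String :=
  match fuel with
  | 0 => chunks
  | f + 1 => if (chunks.length : Int) < n then pvPadGo n f (chunks ++ [""]) else chunks

def pvPadA (chunks : List String) (n : Int) : List String :=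
  pvPadGo n n.toNat chunks

def distribute_transcript_evenly (transcript : String) (n : Int) : List String :=
  if n ≤ 0 then []
  else if n = 1 then [transcript]
  else
    let words := PySem.Str.split₀ transcript
    let total : Int := words.length
    if total = 0 then PySem.List.pyRepeat [""] n
    else
      let chunk_size := -(PySem.Int.floordiv (-total) n)   -- math.ceil(total / n)
      let chunks := (PySem.List.pyRange 0 n 1).foldl (fun acc i =>
        let start := i * chunk_size
        let stop := min (start + chunk_size) total
        acc ++ [PySem.Str.join " " (PySem.List.slice words (some start) (some stop))]) []
      pvPadA chunks n

-- ===== PORT B =====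
-- the loop body of Source B: state (chunks, cur, count); the Python str 'cur' is carried
-- as its exact List Char code-point representation, 'cur + " " + w' is list append
def pvStepB (chunk_size : Int) (st : List String × List Char × Int) (w : String) :
    List String × List Char × Int :=
  let cur := if st.2.2 = 0 then w.toList else st.2.1 ++ ' ' :: w.toList
  let count := st.2.2 + 1
  if count = chunk_size then (st.1 ++ [String.ofList cur], [], 0) else (st.1, cur, count)

def distribute_transcript_evenly_alt (transcript : String) (n : Int) : List String :=
  if n ≤ 0 then []
  else if n = 1 then [transcript]
  else
    let words := PySem.Str.split₀ transcript
    let total : Int := words.length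
    if total = 0 then PySem.List.pyRepeat [""] n
    else
      let chunk_size := PySem.Int.floordiv (total + n - 1) n   -- (total + n - 1) // n
      let st := words.foldl (pvStepB chunk_size) ([], [], 0)
      let chunks := if st.2.2 ≠ 0 then st.1 ++ [String.ofList st.2.1] else st.1
      chunks ++ PySem.List.pyRepeat [""] (n - chunks.length)

-- ===== PRECONDITION & SPEC =====
def Spec_distribute_transcript_evenly (transcript : String) (n : Int) (out : List String) : Prop := out = distribute_transcript_evenly_alt transcript n
instance (transcript : String) (n : Int) (out : List String) : Decidable (Spec_distribute_transcript_evenly transcript n out) := by unfold Spec_distribute_transcript_evenly; infer_instance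

-- ===== CLAIM (what is proved, stated in full; the proofs are below) =====
def Claim_equal_distribute_transcript_evenly : Prop := ∀ (transcript : String) (n : Int), Dom_distribute_transcript_evenly transcript n → Spec_distribute_transcript_evenly transcript n (distribute_transcript_evenly transcript n)

-- ===== LEMMAS AND PROOFS =====

-- grouping of the word list into blocks of cs+1 words, each joined with single spaces:
-- the common shape both programs produce before padding
def pvGrp (cs : Nat) (ws : List String) : List String :=
  match ws with
  | [] => []
  | w :: rest =>
      PySem.Str.join " " ((w :: rest).take (cs + 1)) :: pvGrp cs (rest.drop cs)
termination_by ws.length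
decreasing_by simp

theorem pvPadA_noop (c : List String) (n : Int) (h : n ≤ (c.length : Int)) : pvPadA c n = c := by
  unfold pvPadA
  cases hf : n.toNat with
  | zero => rfl
  | succ f => simp [pvPadGo, not_lt.mpr h]

theorem pv_join_nil : PySem.Str.join " " ([] : List String) = "" := by decide

theorem pv_ceil_eq (t n : Int) (hn : 0 < n) :
    -(PySem.Int.floordiv (-t) n) = PySem.Int.floordiv (t + n - 1) n := by
  have hq := (PySem.Int.floordiv_eq_iff_of_pos
    (a := t + n - 1) (b := n) (q := PySem.Int.floordiv (t + n - 1) n) hn).mp rfl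
  exact (PySem.Int.neg_floordiv_neg_eq_iff_of_pos hn).mpr
    ⟨by nlinarith [hq.1, hq.2], by nlinarith [hq.1, hq.2]⟩

theorem pv_join_snoc (xs : List (List Char)) (y : List Char) (h : xs ≠ []) :
    PySem.Chars.join [' '] (xs ++ [y]) = PySem.Chars.join [' '] xs ++ ' ' :: y := by
  induction xs with
  | nil => exact absurd rfl h
  | cons x xs ih =>
    cases xs with
    | nil =>
      simp [PySem.Chars.join_cons_cons, PySem.Chars.join_singleton]
    | cons z zs =>
      have h' : z :: zs ≠ [] := by simp
      have hsh : (x :: z :: zs) ++ [y] = x :: z :: (zs ++ [y]) := by simp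
      rw [hsh, PySem.Chars.join_cons_cons, PySem.Chars.join_cons_cons]
      have hsh2 : z :: (zs ++ [y]) = (z :: zs) ++ [y] := by simp
      rw [hsh2, ih h']
      simp [List.append_assoc]

-- the A side reduced to pvGrp: map of slice-joins over range-by-chunk_size
theorem pv_core (w : List String) (n : Int) (h2 : 2 ≤ n) (ht : 1 ≤ (w.length : Int)) :
    pvPadA ((PySem.List.pyRange 0 n 1).foldl (fun acc i =>
        acc ++ [PySem.Str.join " " (PySem.List.slice w
          (some (i * (-(PySem.Int.floordiv (-(w.length : Int)) n))))
          (some (min (i * (-(PySem.Int.floordiv (-(w.length : Int)) n)) + (-(PySem.Int.floordiv (-(w.length : Int)) n))) (w.length : Int))))]) []) n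
    = ((PySem.List.pyRange 0 (w.length : Int) (-(PySem.Int.floordiv (-(w.length : Int)) n))).map (fun i =>
        PySem.Str.join " " (PySem.List.slice w (some i) (some (i + (-(PySem.Int.floordiv (-(w.length : Int)) n)))))))
      ++ PySem.List.pyRepeat [""] (n - ((PySem.List.pyRange 0 (w.length : Int) (-(PySem.Int.floordiv (-(w.length : Int)) n))).map (fun i =>
        PySem.Str.join " " (PySem.List.slice w (some i) (some (i + (-(PySem.Int.floordiv (-(w.length : Int)) n))))))).length) := by
  set t : Int := (w.length : Int) with htdef
  set cs : Int := -(PySem.Int.floordiv (-t) n) with hcsdef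
  have hbr : (cs - 1) * n < t ∧ t ≤ cs * n :=
    (PySem.Int.neg_floordiv_neg_eq_iff_of_pos (a := t) (b := n) (q := cs) (by omega)).mp rfl
  have hcs1 : 1 ≤ cs := by nlinarith [hbr.1, hbr.2]
  set K : Int := (t - 0 + cs - 1) / cs with hKdef
  have hK0 : 0 ≤ K := Int.ediv_nonneg (by omega) (by omega)
  have hKup : t ≤ K * cs := by
    have := Int.lt_ediv_add_one_mul_self (t - 0 + cs - 1) (b := cs) (by omega)
    nlinarith
  have hKn : K ≤ n := by
    have h1 : K * cs ≤ t - 0 + cs - 1 := Int.ediv_mul_le _ (by omega)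
    have h3 : K * cs < (n + 1) * cs := by nlinarith [hbr.2]
    exact Int.le_of_lt_add_one (lt_of_mul_lt_mul_right h3 (by omega))
  have hrange : PySem.List.pyRange 0 t cs = (List.range K.toNat).map (fun (k : Nat) => 0 + cs * (k : Int)) := by
    rw [PySem.List.pyRange_of_pos 0 t (by omega)]
    simp only [if_pos (by omega : (0:Int) < t)]
    rfl
  rw [PySem.List.foldl_append_singleton_eq_map, List.nil_append]
  have hpad : ((PySem.List.pyRange 0 n 1).map (fun i =>
      PySem.Str.join " " (PySem.List.slice w (some (i * cs)) (some (min (i * cs + cs) t))))).length = n.toNat := by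
    simp [PySem.List.length_pyRange_one]
  rw [pvPadA_noop _ _ (by rw [hpad]; omega)]
  rw [PySem.List.pyRange_one 0 n, hrange]
  have hsplit : (n - 0).toNat = K.toNat + ((n - 0).toNat - K.toNat) := by omega
  rw [hsplit, List.range_add, List.map_append, List.map_append]
  congr 1
  · rw [List.map_map, List.map_map]
    apply List.map_congr_left
    intro k hk
    have hkK : (k : Int) < K := by
      have := List.mem_range.mp hk; omega
    have ha0 : 0 ≤ cs * (k : Int) := by positivity
    simp only [Function.comp_apply, zero_add]
    have harg : (k : Int) * cs = cs * (k : Int) := by ring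
    rw [harg]
    congr 1
    by_cases hcl : cs * (k : Int) + cs ≤ t
    · rw [min_eq_left hcl]
    · rw [min_eq_right (by omega), PySem.List.slice_toNat w ha0 (by omega),
        PySem.List.slice_toNat w ha0 (by omega),
        List.take_of_length_le (by simp only [List.length_drop]; omega),
        List.take_of_length_le (by simp only [List.length_drop]; omega)]
  · rw [List.map_map, List.map_map]
    have hall : ∀ x ∈ List.range ((n - 0).toNat - K.toNat),
        (((fun i => PySem.Str.join " " (PySem.List.slice w (some (i * cs)) (some (min (i * cs + cs) t)))) ∘
          (fun (k : Nat) => (0 : Int) + (k : Int))) ∘ (fun x => K.toNat + x)) x = "" := by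
      intro x hx
      simp only [Function.comp_apply, zero_add]
      have hKx : K ≤ ((K.toNat + x : Nat) : Int) := by push_cast; omega
      have hstart : t ≤ ((K.toNat + x : Nat) : Int) * cs := by nlinarith
      have h0 : 0 ≤ ((K.toNat + x : Nat) : Int) * cs := by omega
      rw [min_eq_right (by omega), PySem.List.slice_toNat w h0 (by omega),
        List.drop_eq_nil_of_le (by omega), List.take_nil, pv_join_nil]
    rw [List.map_congr_left hall]
    have : (fun (_ : Nat) => "") = Function.const Nat "" := rfl
    rw [this, List.map_const, PySem.List.pyRepeat_singleton]
    simp only [List.length_map, List.length_range]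
    congr 1
    omega

-- the range-by-chunk_size map of slice-joins IS pvGrp (pure Nat form)
theorem pv_map_range_grp_aux (c : Nat) (hc : 1 ≤ c) : ∀ (N : Nat) (ws : List String),
    ws.length ≤ N →
    (List.range ((ws.length + c - 1) / c)).map (fun k =>
      PySem.Str.join " " ((ws.drop (c * k)).take c)) = pvGrp (c - 1) ws := by
  intro N
  induction N with
  | zero =>
    intro ws hws
    have hnil : ws = [] := List.eq_nil_of_length_eq_zero (by omega)
    subst hnil
    simp [pvGrp]
    omega
  | succ N ih =>
    intro ws hws
    cases hws0 : ws with
    | nil =>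
      simp [pvGrp]
      omega
    | cons w rest =>
      subst hws0
      set t := (w :: rest).length with htd
      have ht1 : 1 ≤ t := by simp [htd]
      have hstep : (t + c - 1) / c = ((t - c) + c - 1) / c + 1 := by
        by_cases hle : t ≤ c
        · have h1 : (t + c - 1) / c = 1 := Nat.div_eq_of_lt_le (by omega) (by omega)
          have h0 : ((t - c) + c - 1) / c = 0 := Nat.div_eq_of_lt (by omega)
          omega
        · have h : t + c - 1 = ((t - c) + c - 1) + c := by omega
          rw [h, Nat.add_div_right _ (by omega)]
      rw [hstep, List.range_succ_eq_map, List.map_cons, List.map_map]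
      have hdropc : (w :: rest).drop c = rest.drop (c - 1) := by
        have hc2 : c = (c - 1) + 1 := by omega
        conv_lhs => rw [hc2, List.drop_succ_cons]
      have hlen' : (rest.drop (c - 1)).length = t - c := by
        simp [htd]; omega
      have htail : ∀ k, (fun k => PySem.Str.join " " (((w :: rest).drop (c * k)).take c))
          (Nat.succ k) = PySem.Str.join " " (((rest.drop (c - 1)).drop (c * k)).take c) := by
        intro k
        have : c * Nat.succ k = c + c * k := by simp [Nat.mul_succ]; omega
        simp only [this, ← List.drop_drop, hdropc]
      have hmap : (List.range (((t - c) + c - 1) / c)).map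
            ((fun k => PySem.Str.join " " (((w :: rest).drop (c * k)).take c)) ∘ Nat.succ)
          = (List.range (((rest.drop (c - 1)).length + c - 1) / c)).map
            (fun k => PySem.Str.join " " (((rest.drop (c - 1)).drop (c * k)).take c)) := by
        rw [hlen']
        exact List.map_congr_left (fun k _ => htail k)
      rw [hmap, ih (rest.drop (c - 1)) (by omega)]
      show PySem.Str.join " " (((w :: rest).drop (c * 0)).take c) :: _ = _
      have hc' : c - 1 + 1 = c := by omega
      conv_rhs => rw [pvGrp]
      rw [hc']
      simp

theorem pv_map_range_grp (c : Nat) (hc : 1 ≤ c) (ws : List String) :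
    (List.range ((ws.length + c - 1) / c)).map (fun k =>
      PySem.Str.join " " ((ws.drop (c * k)).take c)) = pvGrp (c - 1) ws :=
  pv_map_range_grp_aux c hc ws.length ws le_rfl

-- the map over pyRange 0 len cs of slice-joins IS pvGrp
theorem pv_A_grp (w : List String) (cs : Int) (hcs : 1 ≤ cs) :
    ((PySem.List.pyRange 0 (w.length : Int) cs).map (fun i =>
        PySem.Str.join " " (PySem.List.slice w (some i) (some (i + cs))))) = pvGrp (cs.toNat - 1) w := by
  obtain ⟨c, rfl⟩ : ∃ c : Nat, cs = (c : Int) := ⟨cs.toNat, by omega⟩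
  have hc : 1 ≤ c := by exact_mod_cast hcs
  rw [PySem.List.pyRange_of_pos 0 _ (by exact_mod_cast hc)]
  cases hw0 : w with
  | nil => simp [pvGrp]
  | cons x xs =>
    rw [← hw0]
    have hlp : (0 : Int) < (w.length : Int) := by rw [hw0]; simp
    rw [if_pos hlp]
    have h1 : (w.length : Int) - 0 + c - 1 = ((w.length + c - 1 : Nat) : Int) := by
      omega
    have hKe : ((w.length : Int) - 0 + c - 1) / (c : Int) = (((w.length + c - 1) / c : Nat) : Int) := by
      rw [h1, ← Int.natCast_ediv]
    rw [hKe, Int.toNat_natCast, List.map_map, Int.toNat_natCast]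
    rw [← pv_map_range_grp c hc w]
    apply List.map_congr_left
    intro k _
    simp only [Function.comp_apply, zero_add]
    have h2 : (c : Int) * (k : Int) = ((c * k : Nat) : Int) := by push_cast; ring
    rw [h2, PySem.List.slice_natCast_add]

-- the B fold with its flush IS pvGrp (invariant: cur is the join of the pending words)
theorem pv_B_grp (cs : Nat) (ws : List String) : ∀ (pending chunks : List String),
    pending.length < cs + 1 →
    (let st := ws.foldl (pvStepB ((cs : Int) + 1))
        (chunks, PySem.Chars.join [' '] (pending.map String.toList), (pending.length : Int))
     if st.2.2 ≠ 0 then st.1 ++ [String.ofList st.2.1] else st.1)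
    = chunks ++ pvGrp cs (pending ++ ws) := by
  induction ws with
  | nil =>
    intro pending chunks hp
    cases pending with
    | nil => simp [pvGrp]
    | cons p ps =>
      simp only [List.foldl_nil]
      have hne : (((p :: ps).length : Int) ≠ 0) := by simp; omega
      have htake : (p :: ps).take (cs + 1) = p :: ps :=
        List.take_of_length_le (by simp at hp ⊢; omega)
      have hdrop : ps.drop cs = [] :=
        List.drop_eq_nil_of_le (by simp at hp ⊢; omega)
      rw [if_pos hne, List.append_nil, pvGrp, htake, hdrop, pvGrp]
      rfl
  | cons w ws ih =>
    intro pending chunks hp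
    simp only [List.foldl_cons]
    cases pending with
    | nil =>
      simp only [List.map_nil, PySem.Chars.join_nil, List.length_nil, Nat.cast_zero]
      by_cases hc0 : cs = 0
      · subst hc0
        simp only [Nat.cast_zero]
        have hstep : pvStepB ((0 : Int) + 1) (chunks, ([] : List Char), (0 : Int)) w
            = (chunks ++ [String.ofList w.toList], [], 0) := by
          simp [pvStepB]
        rw [hstep]
        have hih := ih [] (chunks ++ [String.ofList w.toList]) (by simp)
        simp only [List.map_nil, PySem.Chars.join_nil, List.length_nil, Nat.cast_zero,
          List.nil_append] at hih
        rw [hih, List.nil_append, pvGrp]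
        simp [List.append_assoc, PySem.Str.join, PySem.Chars.join_singleton]
      · have hstep : pvStepB ((cs : Int) + 1) (chunks, ([] : List Char), (0 : Int)) w
            = (chunks, w.toList, 1) := by
          simp [pvStepB, hc0]
        rw [hstep]
        have hih := ih [w] chunks (by simp; omega)
        simp only [List.map_cons, List.map_nil, PySem.Chars.join_singleton,
          List.length_cons, List.length_nil, Nat.cast_one, zero_add,
          List.singleton_append] at hih
        rw [hih, List.nil_append]
    | cons p ps =>
      have hne0 : (((p :: ps).length : Int) ≠ 0) := by simp; omega
      have hcur : PySem.Chars.join [' '] ((p :: ps).map String.toList) ++ ' ' :: w.toList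
          = PySem.Chars.join [' '] (((p :: ps) ++ [w]).map String.toList) := by
        rw [List.map_append]
        simp only [List.map_cons, List.map_nil]
        rw [pv_join_snoc _ _ (by simp)]
      by_cases hfl : ((p :: ps).length : Int) + 1 = (cs : Int) + 1
      · have hlen : (p :: ps).length = cs := by
          have h' : ((p :: ps).length : Int) = (cs : Int) := by omega
          exact_mod_cast h'
        have hstep : pvStepB ((cs : Int) + 1)
            (chunks, PySem.Chars.join [' '] ((p :: ps).map String.toList), ((p :: ps).length : Int)) w
            = (chunks ++ [String.ofList (PySem.Chars.join [' '] (((p :: ps) ++ [w]).map String.toList))], [], 0) := by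
          simp only [pvStepB, if_neg hne0, if_pos hfl, hcur]
        rw [hstep]
        have hih := ih [] (chunks ++ [String.ofList (PySem.Chars.join [' '] (((p :: ps) ++ [w]).map String.toList))]) (by simp)
        simp only [List.map_nil, PySem.Chars.join_nil, List.length_nil, Nat.cast_zero,
          List.nil_append] at hih
        rw [hih]
        have hofl : String.ofList (PySem.Chars.join [' '] (((p :: ps) ++ [w]).map String.toList))
            = PySem.Str.join " " ((p :: ps) ++ [w]) := rfl
        have happ : (p :: ps) ++ w :: ws = ((p :: ps) ++ [w]) ++ ws := by simp
        rw [happ]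
        have hshape : ((p :: ps) ++ [w]) ++ ws = p :: ((ps ++ [w]) ++ ws) := by simp
        rw [hshape, pvGrp]
        have hlen' : ps.length + 1 = cs := by simpa using hlen
        have htk : (p :: ((ps ++ [w]) ++ ws)).take (cs + 1) = (p :: ps) ++ [w] := by
          have heq : p :: ((ps ++ [w]) ++ ws) = ((p :: ps) ++ [w]) ++ ws := by simp
          rw [heq]
          exact List.take_left' (by simp; omega)
        have hdr : ((ps ++ [w]) ++ ws).drop cs = ws :=
          List.drop_left' (by simp; omega)
        rw [htk, hdr, hofl]
        simp [List.append_assoc]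
      · have hstep : pvStepB ((cs : Int) + 1)
            (chunks, PySem.Chars.join [' '] ((p :: ps).map String.toList), ((p :: ps).length : Int)) w
            = (chunks, PySem.Chars.join [' '] (((p :: ps) ++ [w]).map String.toList),
               ((p :: ps).length : Int) + 1) := by
          simp only [pvStepB, if_neg hne0, if_neg hfl, hcur]
        rw [hstep]
        have hlt : ((p :: ps) ++ [w]).length < cs + 1 := by
          simp at hp ⊢
          have : (p :: ps).length ≠ cs := by
            intro h; exact hfl (by rw [h])
          simp at this
          omega
        have hih := ih ((p :: ps) ++ [w]) chunks hlt
        have hlc : ((((p :: ps) ++ [w]).length : Nat) : Int) = ((p :: ps).length : Int) + 1 := by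
          simp
        rw [hlc] at hih
        rw [hih]
        simp [List.append_assoc]

-- ===== VERDICT (by name: the statement is the Claim_ definition above) =====
theorem distribute_transcript_evenly_spec : Claim_equal_distribute_transcript_evenly := by
  intro transcript n _
  unfold Spec_distribute_transcript_evenly distribute_transcript_evenly distribute_transcript_evenly_alt
  by_cases h0 : n ≤ 0
  · simp [h0]
  by_cases h1 : n = 1
  · simp [h1]
  simp only [if_neg h0, if_neg h1]
  by_cases ht : ((PySem.Str.split₀ transcript).length : Int) = 0
  · simp only [if_pos ht]
  · simp only [if_neg ht]
    set w := PySem.Str.split₀ transcript with hw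
    set t : Int := (w.length : Int) with htd
    have h2 : 2 ≤ n := by omega
    have ht1 : 1 ≤ t := by omega
    set cs : Int := -(PySem.Int.floordiv (-t) n) with hcsdef
    have hbr : (cs - 1) * n < t ∧ t ≤ cs * n :=
      (PySem.Int.neg_floordiv_neg_eq_iff_of_pos (a := t) (b := n) (q := cs) (by omega)).mp rfl
    have hcs1 : 1 ≤ cs := by nlinarith [hbr.1, hbr.2]
    have hceq : PySem.Int.floordiv (t + n - 1) n = cs := (pv_ceil_eq t n (by omega)).symm
    rw [pv_core w n h2 ht1, hceq]
    rw [← hcsdef, ← htd]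
    rw [pv_A_grp w cs hcs1]
    have hcast : ((cs.toNat - 1 : Nat) : Int) + 1 = cs := by omega
    have hB := pv_B_grp (cs.toNat - 1) w [] [] (by simp)
    rw [hcast] at hB
    simp only [List.map_nil, PySem.Chars.join_nil, List.length_nil, Nat.cast_zero,
      List.nil_append] at hB
    rw [hB]
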